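-- pv_equiv track=rewrite | github.com/Fondamenti18/fondamenti-di-programmazione | students/1742740/homework02/program03.py | analizza
-- ===== SOURCE A (Python) =====
-- def analizza(parola,codice):
--         dizionario={}
--         if len(parola)!=len(codice): #torna false se la lunghezza della parola non e' uguale a quella del codice di analizzare
--             return False
--         else:
--             for c in range(len(parola)): #ciclo che pone come chiave nel dizionario il numero in codice e gli assegna la lettera corrispondente in parola
--                 if codice[c] not in dizionario.keys() and parola[c] not in dizionario.values():
--                     dizionario[codice[c]]=parola[c]
--                 elif codice[c] in dizionario.keys() and dizionario[codice[c]]==parola[c]: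
--                     continue
--                 else:    #se prova a sostituire la lettera assegnata al numero con una diversa ritorna false
--                     return False
--                     break
--         return True #se la parola ha stessa struttura di codice ritorna true
-- ===== SOURCE B (Python) =====
-- def analizza(parola, codice):
--     def sig(s):
--         first = {}
--         return [first.setdefault(ch, i) for i, ch in enumerate(s)]
--     return len(parola) == len(codice) and sig(parola) == sig(codice)
-- ===== Notes on version B (the rewrite author's own statement) =====
-- stated objective: alternative
-- what changed: Instead of incrementally maintaining a code->letter dictionary with a values() scan per character, B canonicalises each string independently to its first-occurrence-index signature and compares the two signatures; two strings are bijectively isomorphic iff their canonical patterns coincide.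
import Mathlib
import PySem

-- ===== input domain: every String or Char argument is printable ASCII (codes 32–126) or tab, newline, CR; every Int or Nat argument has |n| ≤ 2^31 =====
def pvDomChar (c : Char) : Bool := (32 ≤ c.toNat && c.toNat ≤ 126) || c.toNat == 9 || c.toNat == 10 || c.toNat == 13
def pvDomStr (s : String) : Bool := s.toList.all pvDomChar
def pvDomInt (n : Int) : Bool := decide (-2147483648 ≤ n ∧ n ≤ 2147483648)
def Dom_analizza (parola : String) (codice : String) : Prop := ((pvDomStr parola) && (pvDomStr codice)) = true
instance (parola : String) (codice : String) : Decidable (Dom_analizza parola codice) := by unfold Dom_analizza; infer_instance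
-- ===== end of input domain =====

-- B replaces A's incremental code->letter dictionary (with its values() scan per step) by
-- canonicalising each string independently to its first-occurrence-index signature and
-- comparing the two signatures (objective: alternative algorithm).

-- ===== PORT A =====
-- the 'for c in range(len(parola))' loop, with early return False
def analizzaLoopA (p q : List Char) : List Int → PySem.Dict Char Char → Bool
  | [], _ => true
  | c :: rest, d =>
    match PySem.List.pyGet? q c, PySem.List.pyGet? p c with
    | some x, some y =>
      if d.contains x = false ∧ y ∉ d.values then
        analizzaLoopA p q rest (d.insert x y)
      else if d.contains x = true ∧ d.get? x = some y then
        analizzaLoopA p q rest d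
      else false
    | _, _ => false   -- unreachable: indices of range(len) are in range

def analizza (parola : String) (codice : String) : Bool :=
  let p := parola.toList
  let q := codice.toList
  if p.length ≠ q.length then false
  else analizzaLoopA p q (PySem.List.pyRange 0 p.length 1) PySem.Dict.empty

-- ===== PORT B =====
-- the '[first.setdefault(ch, i) for i, ch in enumerate(s)]' comprehension:
-- setdefault returns the existing value (or i after inserting it)
def sigLoop : List (Int × Char) → PySem.Dict Char Int → List Int
  | [], _ => []
  | (i, ch) :: rest, first =>
    ((first.get? ch).getD i) :: sigLoop rest (first.setdefault ch i)

def sig (s : String) : List Int :=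
  sigLoop (PySem.List.enumerate s.toList 0) PySem.Dict.empty

def analizza_alt (parola : String) (codice : String) : Bool :=
  (parola.toList.length == codice.toList.length) && (sig parola == sig codice)

-- ===== PRECONDITION & SPEC =====
def Spec_analizza (parola : String) (codice : String) (out : Bool) : Prop := out = analizza_alt parola codice
instance (parola : String) (codice : String) (out : Bool) : Decidable (Spec_analizza parola codice out) := by unfold Spec_analizza; infer_instance

-- ===== CLAIM =====
def Claim_equal_analizza : Prop := ∀ (parola : String) (codice : String), Dom_analizza parola codice → Spec_analizza parola codice (analizza parola codice)

-- ===== LEMMAS AND PROOFS =====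

-- A's loop body rewritten over the zipped pairs (proof helper only)
def zipLoopA : List (Char × Char) → PySem.Dict Char Char → Bool
  | [], _ => true
  | (x, y) :: rest, d =>
    if d.contains x = false ∧ y ∉ d.values then
      zipLoopA rest (d.insert x y)
    else if d.contains x = true ∧ d.get? x = some y then
      zipLoopA rest d
    else false

-- A's index loop over range(k, n) is the same computation as A's body over the zipped tails.
lemma loopA_eq_zip (p q : List Char) (h : p.length = q.length) :
    ∀ (k : Nat) (d : PySem.Dict Char Char), k ≤ p.length →
      analizzaLoopA p q (PySem.List.pyRange (k : Int) (p.length : Int) 1) d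
        = zipLoopA ((q.drop k).zip (p.drop k)) d := by
  intro k
  induction hk : p.length - k generalizing k with
  | zero =>
    intro d hle
    have hk' : k = p.length := by omega
    subst hk'
    rw [PySem.List.pyRange_one_eq_nil (by omega)]
    simp [List.drop_of_length_le, analizzaLoopA, zipLoopA]
  | succ m ih =>
    intro d hle
    have hlt : k < p.length := by omega
    rw [PySem.List.pyRange_one_cons (by exact_mod_cast hlt)]
    have hq : k < q.length := by omega
    have hgq : PySem.List.pyGet? q (k : Int) = some q[k] := by
      simp [PySem.List.pyGet?_natCast, List.getElem?_eq_getElem hq]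
    have hgp : PySem.List.pyGet? p (k : Int) = some p[k] := by
      simp [PySem.List.pyGet?_natCast, List.getElem?_eq_getElem hlt]
    have hdq : q.drop k = q[k] :: q.drop (k + 1) := List.drop_eq_getElem_cons hq
    have hdp : p.drop k = p[k] :: p.drop (k + 1) := List.drop_eq_getElem_cons hlt
    have hcast : ((k : Int) + 1) = ((k + 1 : Nat) : Int) := by push_cast; ring
    rw [hdq, hdp]
    simp only [analizzaLoopA, hgq, hgp, zipLoopA, List.zip_cons_cons, hcast]
    split_ifs <;> first
      | exact ih (k + 1) (by omega) _ (by omega)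
      | rfl

-- with nodup keys, a value is in values iff some key maps to it
lemma mem_values_iff (d : PySem.Dict Char Char) (hnd : d.keys.Nodup) (y : Char) :
    y ∈ d.values ↔ ∃ x, d.get? x = some y := by
  constructor
  · intro hy
    simp only [PySem.Dict.values, List.mem_map] at hy
    obtain ⟨⟨x, y'⟩, hmem, hy'⟩ := hy
    cases hy'
    exact ⟨x, PySem.Dict.get?_of_mem_items d hmem hnd⟩
  · rintro ⟨x, hx⟩
    have := PySem.Dict.mem_items_of_get?_eq_some d hx
    simp only [PySem.Dict.values, List.mem_map]
    exact ⟨(x, y), this, rfl⟩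

-- head equality / inequality of list Bool-equality
lemma cons_beq_same_head (a : Int) (t1 t2 : List Int) :
    ((a :: t1 : List Int) == a :: t2) = (t1 == t2) := by
  by_cases h : t1 = t2 <;> simp [h]

lemma cons_beq_ne_head (a b : Int) (t1 t2 : List Int) (h : a ≠ b) :
    ((a :: t1 : List Int) == b :: t2) = false := by
  simp [h]

-- core: A's zipped loop equals the Bool-comparison of the two first-occurrence signatures,
-- under the invariant that dq/dp record the first index of each code/letter seen so far
-- and dA maps exactly the seen codes to the seen letters.
lemma zipA_eq_sig (zs : List (Char × Char)) :
    ∀ (i : Int) (dA : PySem.Dict Char Char) (dq dp : PySem.Dict Char Int),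
      dA.keys.Nodup →
      (∀ x, (dA.get? x).isSome = (dq.get? x).isSome) →
      (∀ x y, dA.get? x = some y → dq.get? x = dp.get? y) →
      (∀ y, (∃ x, dA.get? x = some y) ↔ (dp.get? y).isSome = true) →
      (∀ y j, dp.get? y = some j → j < i) →
      (∀ x j, dq.get? x = some j → j < i) →
      (∀ y y' j, dp.get? y = some j → dp.get? y' = some j → y = y') →
      zipLoopA zs dA
        = (sigLoop (PySem.List.enumerate (zs.map Prod.snd) i) dp
            == sigLoop (PySem.List.enumerate (zs.map Prod.fst) i) dq) := by
  induction zs with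
  | nil => intro i dA dq dp _ _ _ _ _ _ _; simp [zipLoopA, PySem.List.enumerate_nil, sigLoop]
  | cons xy rest ih =>
    obtain ⟨x, y⟩ := xy
    intro i dA dq dp hnd H1 H2 H3 H4 H5 H6
    simp only [List.map_cons, PySem.List.enumerate_cons, sigLoop, zipLoopA]
    by_cases hc : dA.contains x = true
    · -- x already a key
      obtain ⟨y', hy'⟩ : ∃ y', dA.get? x = some y' := by
        rw [PySem.Dict.contains_eq_isSome_get?] at hc
        exact Option.isSome_iff_exists.mp hc
      have hqx : dq.get? x = dp.get? y' := H2 x y' hy'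
      obtain ⟨j, hj⟩ : ∃ j, dq.get? x = some j := by
        have := H1 x; rw [hy'] at this
        exact Option.isSome_iff_exists.mp this.symm
      have hcq : dq.contains x = true := by
        rw [PySem.Dict.contains_eq_isSome_get?, hj]; rfl
      rw [if_neg (show ¬(dA.contains x = false ∧ y ∉ dA.values) from fun hp => by
            rw [hc] at hp; exact absurd hp.1 (by simp))]
      rw [PySem.Dict.setdefault_of_contains dq i hcq, hj]
      by_cases hv : dA.get? x = some y
      · -- same letter: heads equal, dicts unchanged
        have hyy' : y' = y := by rw [hy'] at hv; exact Option.some.inj hv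
        subst hyy'
        have hpy : dp.get? y' = some j := by rw [← hqx]; exact hj
        have hcp : dp.contains y' = true := by
          rw [PySem.Dict.contains_eq_isSome_get?, hpy]; rfl
        rw [if_pos ⟨hc, hv⟩, hpy,
            PySem.Dict.setdefault_of_contains dp i hcp]
        simp only [Option.getD_some]
        rw [cons_beq_same_head]
        exact ih (i + 1) dA dq dp hnd H1 H2 H3
          (fun y j h => lt_trans (H4 y j h) (by omega))
          (fun x j h => lt_trans (H5 x j h) (by omega)) H6
      · -- different letter: A returns false, the signature heads differ
        rw [if_neg (fun hp => hv hp.2)]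
        have hy'y : y' ≠ y := fun h => hv (h ▸ hy')
        have hpy' : dp.get? y' = some j := by rw [← hqx]; exact hj
        cases hpy : dp.get? y with
        | none =>
          -- letter y fresh: its head is i, but j < i
          have hji : j < i := H5 x j hj
          simp only [Option.getD_none, Option.getD_some]
          exact (cons_beq_ne_head _ _ _ _ (by omega)).symm
        | some k =>
          have hkj : k ≠ j := fun h => hy'y (H6 y' y j hpy' (h ▸ hpy))
          simp only [Option.getD_some]
          exact (cons_beq_ne_head _ _ _ _ hkj).symm
    · -- x fresh
      have hc' : dA.contains x = false := by simpa using hc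
      have hax : dA.get? x = none := by
        rw [PySem.Dict.contains_eq_isSome_get?] at hc'
        exact Option.not_isSome_iff_eq_none.mp (by simp [hc'])
      have hqx : dq.get? x = none := by
        have := H1 x; rw [hax] at this
        exact Option.not_isSome_iff_eq_none.mp (by simp [← this])
      have hcq : dq.contains x = false := by
        rw [PySem.Dict.contains_eq_isSome_get?, hqx]; rfl
      rw [hqx]
      by_cases hval : y ∈ dA.values
      · -- letter already used: A returns false; heads i vs k < i
        obtain ⟨k, hk⟩ : ∃ k, dp.get? y = some k := by
          rw [mem_values_iff dA hnd y] at hval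
          exact Option.isSome_iff_exists.mp ((H3 y).mp hval)
        have hki : k < i := H4 y k hk
        rw [if_neg (fun hp => hp.2 hval), if_neg (fun hp => by rw [hc'] at hp; exact absurd hp.1 (by simp)),
            hk]
        simp only [Option.getD_some, Option.getD_none]
        exact (cons_beq_ne_head _ _ _ _ (by omega)).symm
      · -- both fresh: heads are both i; insert into all three dicts
        have hpy : dp.get? y = none := by
          cases h : dp.get? y with
          | none => rfl
          | some k =>
            exact absurd ((mem_values_iff dA hnd y).mpr ((H3 y).mpr (by simp [h]))) hval
        have hcp : dp.contains y = false := by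
          rw [PySem.Dict.contains_eq_isSome_get?, hpy]; rfl
        rw [if_pos ⟨hc', hval⟩, hpy,
            PySem.Dict.setdefault_of_not_contains dq i hcq,
            PySem.Dict.setdefault_of_not_contains dp i hcp]
        simp only [Option.getD_none]
        rw [cons_beq_same_head]
        apply ih (i + 1) (dA.insert x y) (dq.insert x i) (dp.insert y i)
          (PySem.Dict.nodup_keys_insert dA x y hnd)
        · intro x'
          rw [PySem.Dict.get?_insert, PySem.Dict.get?_insert]
          split_ifs with h
          · rfl
          · exact H1 x'
        · intro x' y' h
          rw [PySem.Dict.get?_insert] at h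
          rw [PySem.Dict.get?_insert, PySem.Dict.get?_insert]
          by_cases hx' : x' = x
          · rw [if_pos hx'] at h ⊢
            have : y' = y := Option.some.inj h.symm
            rw [if_pos this]
          · rw [if_neg hx'] at h ⊢
            have hy'y : y' ≠ y := by
              intro hcontra
              subst hcontra
              exact hval ((mem_values_iff dA hnd y').mpr ⟨x', h⟩)
            rw [if_neg hy'y]
            exact H2 x' y' h
        · intro y''
          constructor
          · rintro ⟨x', h⟩
            rw [PySem.Dict.get?_insert] at h
            rw [PySem.Dict.get?_insert]
            by_cases hx' : x' = x
            · rw [if_pos hx'] at h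
              rw [if_pos (Option.some.inj h.symm)]; rfl
            · rw [if_neg hx'] at h
              split_ifs with hy''
              · rfl
              · exact (H3 y'').mp ⟨x', h⟩
          · intro h
            rw [PySem.Dict.get?_insert] at h
            by_cases hy'' : y'' = y
            · exact ⟨x, by rw [PySem.Dict.get?_insert, if_pos rfl, hy'']⟩
            · rw [if_neg hy''] at h
              obtain ⟨x', hx'⟩ := (H3 y'').mpr h
              refine ⟨x', ?_⟩
              rw [PySem.Dict.get?_insert, if_neg (fun hcontra => by
                rw [hcontra, hax] at hx'; simp at hx')]
              exact hx'
        · intro y'' j h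
          rw [PySem.Dict.get?_insert] at h
          split_ifs at h with hy''
          · have : j = i := Option.some.inj h.symm
            omega
          · have := H4 y'' j h; omega
        · intro x' j h
          rw [PySem.Dict.get?_insert] at h
          split_ifs at h with hx'
          · have : j = i := Option.some.inj h.symm
            omega
          · have := H5 x' j h; omega
        · intro y1 y2 j h1 h2
          rw [PySem.Dict.get?_insert] at h1 h2
          by_cases hy1 : y1 = y <;> by_cases hy2 : y2 = y
          · rw [hy1, hy2]
          · rw [if_pos hy1] at h1; rw [if_neg hy2] at h2
            have : j = i := Option.some.inj h1.symm
            have := H4 y2 j h2; omega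
          · rw [if_neg hy1] at h1; rw [if_pos hy2] at h2
            have : j = i := Option.some.inj h2.symm
            have := H4 y1 j h1; omega
          · rw [if_neg hy1] at h1; rw [if_neg hy2] at h2
            exact H6 y1 y2 j h1 h2

-- ===== VERDICT =====
theorem analizza_spec : Claim_equal_analizza := by
  intro parola codice _
  unfold Spec_analizza
  have hA : analizza parola codice
      = if parola.toList.length ≠ codice.toList.length then false
        else analizzaLoopA parola.toList codice.toList
          (PySem.List.pyRange 0 (parola.toList.length : Int) 1) PySem.Dict.empty := rfl
  rw [hA]
  unfold analizza_alt
  by_cases hlen : parola.toList.length = codice.toList.length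
  · rw [if_neg (not_not_intro hlen)]
    have h0 := loopA_eq_zip parola.toList codice.toList hlen 0 PySem.Dict.empty (Nat.zero_le _)
    simp only [List.drop_zero, Nat.cast_zero] at h0
    rw [h0]
    have hmapf : ((codice.toList.zip parola.toList).map Prod.fst) = codice.toList :=
      List.map_fst_zip (le_of_eq hlen.symm)
    have hmaps : ((codice.toList.zip parola.toList).map Prod.snd) = parola.toList :=
      List.map_snd_zip (le_of_eq hlen)
    rw [zipA_eq_sig (codice.toList.zip parola.toList) 0 PySem.Dict.empty
          PySem.Dict.empty PySem.Dict.empty PySem.Dict.nodup_keys_empty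
          (by intro x; simp [PySem.Dict.get?_empty])
          (by intro x y h; simp [PySem.Dict.get?_empty] at h)
          (by intro y; simp [PySem.Dict.get?_empty])
          (by intro y j h; simp [PySem.Dict.get?_empty] at h)
          (by intro x j h; simp [PySem.Dict.get?_empty] at h)
          (by intro y1 y2 j h1 h2; simp [PySem.Dict.get?_empty] at h1),
        hmapf, hmaps]
    simp [sig, hlen]
  · rw [if_pos hlen]
    have hlen' : ¬ parola.length = codice.length := by
      rw [← String.length_toList, ← String.length_toList]; exact hlen
    have hb : (parola.toList.length == codice.toList.length) = false := by
      simp [String.length_toList, hlen']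
    rw [hb, Bool.false_and]
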